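-- pv_equiv track=rewrite | github.com/pranavdave893/Leetcode | Tree/1-d_candy_crush.py | candyCrush1D
-- ===== SOURCE A (Python) =====
-- def candyCrush1D(S):
--     stack = []
--
--     for x in S:
--         if not stack:
--             stack.append((x, 1))
--
--         elif stack[-1][0] == x:
--             stack.append((x, stack[-1][1]+1))
--
--         elif stack[-1][1] >= 3:
--             temp = stack[-1][0]
--             while stack and stack[-1][0] == temp:
--                 stack.pop()
--
--             if stack and stack[-1][0] == x:
--                 stack.append((x, stack[-1][1]+1))
--             else:
--                 stack.append((x, 1))
--
--         else:
--             stack.append((x, 1))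
--
--     if stack and stack[-1][1] >= 3:
--         temp = stack[-1][0]
--
--         while stack and stack[-1][0] == temp:
--             stack.pop()
--
--     temp = [x[0] for x in stack]
--     return ''.join(temp)
-- ===== SOURCE B (Python) =====
-- def candyCrush1D(S):
--     # Repeatedly remove the leftmost maximal run of 3+ equal characters,
--     # restarting the scan after each removal, until no such run remains.
--     while True:
--         n = len(S)
--         i = 0
--         removed = False
--         while i < n:
--             j = i
--             while j < n and S[j] == S[i]:
--                 j += 1
--             if j - i >= 3:
--                 S = S[:i] + S[j:]
--                 removed = True
--                 break
--             i = j
--         if not removed: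
--             return S
-- ===== Notes on version B (the rewrite author's own statement) =====
-- stated objective: simpler
-- what changed: Replaced A's one-pass lazy stack of (char, cumulative count) pairs by a plain fixpoint loop that rescans the string, removes the leftmost maximal run of 3+ equal characters, and stops when no such run exists.
import Mathlib
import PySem

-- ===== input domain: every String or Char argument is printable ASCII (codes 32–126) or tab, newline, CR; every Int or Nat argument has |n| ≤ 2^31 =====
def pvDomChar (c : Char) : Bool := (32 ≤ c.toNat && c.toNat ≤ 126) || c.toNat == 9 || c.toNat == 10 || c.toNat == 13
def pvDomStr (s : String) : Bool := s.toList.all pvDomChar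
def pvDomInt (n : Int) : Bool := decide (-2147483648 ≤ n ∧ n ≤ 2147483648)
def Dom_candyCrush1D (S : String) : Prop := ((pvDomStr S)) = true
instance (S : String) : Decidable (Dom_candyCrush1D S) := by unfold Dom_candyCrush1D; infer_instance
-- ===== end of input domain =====

-- B replaces A's one-pass lazy count-stack by a fixpoint loop that repeatedly deletes the
-- leftmost maximal run of 3+ equal characters (simpler, not faster); return values proved equal.

-- ===== PORT A =====
-- the `while stack and stack[-1][0] == temp: stack.pop()` loop (stack head = Python stack top)
def popRunA (t : Char) : List (Char × Nat) → List (Char × Nat)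
  | [] => []
  | (c, k) :: rest => if c = t then popRunA t rest else (c, k) :: rest

-- one iteration of A's `for x in S` loop
def stepA (stack : List (Char × Nat)) (x : Char) : List (Char × Nat) :=
  match stack with
  | [] => [(x, 1)]
  | (c, k) :: rest =>
    if c = x then (x, k + 1) :: (c, k) :: rest
    else if 3 ≤ k then
      match popRunA c ((c, k) :: rest) with
      | (c', k') :: s' => if c' = x then (x, k' + 1) :: (c', k') :: s' else (x, 1) :: (c', k') :: s'
      | [] => [(x, 1)]
    else (x, 1) :: (c, k) :: rest

-- A's final `if stack and stack[-1][1] >= 3` cleanup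
def finishA (stack : List (Char × Nat)) : List (Char × Nat) :=
  match stack with
  | (c, k) :: _ => if 3 ≤ k then popRunA c stack else stack
  | [] => stack

def candyCrush1D (S : String) : String :=
  String.ofList (((finishA (S.toList.foldl stepA [])).map Prod.fst).reverse)

-- ===== PORT B =====
-- B's inner scan: find the leftmost maximal run of length ≥ 3 and return the string with it
-- removed (`some`), or `none` if no such run exists (the `removed` flag stays False).
def findCrush : List Char → Option (List Char)
  | [] => none
  | c :: rest =>
    let r := rest.takeWhile (· == c)
    let rest' := rest.dropWhile (· == c)
    if 3 ≤ r.length + 1 then some rest'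
    else
      match findCrush rest' with
      | some t => some (c :: (r ++ t))
      | none => none
termination_by l => l.length
decreasing_by
  simp only [List.length_cons]
  exact Nat.lt_succ_of_le (List.length_dropWhile_le _ _)


-- facts cited by fixB's termination proof (the outer loop runs on a strictly shorter string)
theorem tw_dw_len (c : Char) (rest : List Char) :
    (rest.takeWhile (· == c)).length + (rest.dropWhile (· == c)).length = rest.length := by
  rw [← List.length_append, List.takeWhile_append_dropWhile]

theorem findCrush_cons (c : Char) (rest : List Char) :
    findCrush (c :: rest) =
      if 3 ≤ (rest.takeWhile (· == c)).length + 1 then some (rest.dropWhile (· == c))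
      else
        match findCrush (rest.dropWhile (· == c)) with
        | some t => some (c :: (rest.takeWhile (· == c) ++ t))
        | none => none := by
  rw [findCrush.eq_def]

theorem flt_aux : ∀ (n : Nat) (l t : List Char), l.length ≤ n → findCrush l = some t → t.length < l.length := by
  intro n
  induction n with
  | zero =>
      intro l t hl h
      rw [List.length_eq_zero_iff.mp (Nat.le_zero.mp hl)] at h
      simp [findCrush] at h
  | succ n ih =>
      intro l t hl h
      match l with
      | [] => simp [findCrush] at h
      | c :: rest =>
        rw [findCrush_cons] at h
        by_cases hif : 3 ≤ (rest.takeWhile (· == c)).length + 1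
        · rw [if_pos hif] at h
          cases h
          exact Nat.lt_succ_of_le (List.length_dropWhile_le _ _)
        · rw [if_neg hif] at h
          cases hfc : findCrush (rest.dropWhile (· == c)) with
          | none => rw [hfc] at h; cases h
          | some t2 =>
            rw [hfc] at h
            cases h
            have hlen : (rest.dropWhile (· == c)).length ≤ n :=
              le_trans (List.length_dropWhile_le _ _) (by simpa using Nat.lt_succ_iff.mp (Nat.lt_of_lt_of_le (by simp) hl))
            have h2 := ih _ _ hlen hfc
            have h3 := tw_dw_len c rest
            simp only [List.length_cons, List.length_append]
            omega

-- B's outer `while True` loop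
def fixB (l : List Char) : List Char :=
  match h : findCrush l with
  | some t => fixB t
  | none => l
termination_by l.length
decreasing_by exact flt_aux l.length l t le_rfl h

def candyCrush1D_alt (S : String) : String := String.ofList (fixB S.toList)

-- ===== PRECONDITION & SPEC =====
def Spec_candyCrush1D (S : String) (out : String) : Prop := out = candyCrush1D_alt S
instance (S : String) (out : String) : Decidable (Spec_candyCrush1D S out) := by unfold Spec_candyCrush1D; infer_instance

-- ===== CLAIM (what is proved, stated in full; the proofs are below) =====
def Claim_equal_candyCrush1D : Prop := ∀ (S : String), Dom_candyCrush1D S → Spec_candyCrush1D S (candyCrush1D S)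

-- ===== LEMMAS AND PROOFS =====

def TF (l : List Char) : Prop := ∀ a : Char, ¬ ([a, a, a] <:+: l)

theorem TF_suffix {u l : List Char} (hs : u <:+ l) (h : TF l) : TF u :=
  fun a hi => h a (hi.trans hs.isInfix)

theorem TF_reverse {l : List Char} (h : TF l) : TF l.reverse := by
  intro a hi
  exact h a (by simpa using List.reverse_infix.mpr (by simpa using hi.reverse))

theorem tw_split {c d : Char} {r w : List Char} (hr : ∀ y ∈ r, y = c) (hd : d ≠ c) :
    (r ++ d :: w).takeWhile (· == c) = r ∧ (r ++ d :: w).dropWhile (· == c) = d :: w := by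
  induction r with
  | nil => simp [hd]
  | cons y r ih =>
      have hy : y = c := hr y (by simp)
      have ih2 := ih (fun z hz => hr z (by simp [hz]))
      simp [hy, ih2.1, ih2.2]

-- run ≥ 3 at the front of u contradicts TF
theorem TF_run_short {c : Char} {u' : List Char} (h : TF (c :: u')) :
    (u'.takeWhile (· == c)).length ≤ 1 := by
  by_contra hlen
  push_neg at hlen
  have : 2 ≤ (u'.takeWhile (· == c)).length := hlen
  obtain ⟨x, y, rest, hxy⟩ : ∃ x y rest, u'.takeWhile (· == c) = x :: y :: rest := by
    match htw : u'.takeWhile (· == c) with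
    | [] => rw [htw] at this; simp at this
    | [x] => rw [htw] at this; simp at this
    | x :: y :: rest => exact ⟨x, y, rest, rfl⟩
  have hx : x = c := by
    have := List.mem_takeWhile_imp (l := u') (p := (· == c)) (x := x) (by rw [hxy]; simp)
    simpa using this
  have hy : y = c := by
    have := List.mem_takeWhile_imp (l := u') (p := (· == c)) (x := y) (by rw [hxy]; simp)
    simpa using this
  obtain ⟨w, hw⟩ : ∃ w, u'.dropWhile (· == c) = w := ⟨_, rfl⟩
  have hpre : u' = x :: y :: rest ++ w := by
    conv_lhs => rw [← List.takeWhile_append_dropWhile (p := (· == c)) (l := u')]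
    rw [hxy, hw]
  apply h c
  refine ⟨[], rest ++ w, ?_⟩
  subst hx hy
  rw [hpre]
  simp

theorem findCrush_run {a : Char} {k : Nat} {v : List Char} (hk : 3 ≤ k)
    (hv : ∀ y ∈ v.head?, y ≠ a) :
    findCrush (List.replicate k a ++ v) = some v := by
  obtain ⟨k', rfl⟩ : ∃ k', k = k' + 1 := ⟨k - 1, by omega⟩
  have hrep : List.replicate (k' + 1) a ++ v = a :: (List.replicate k' a ++ v) := by
    simp [List.replicate_succ]
  rw [hrep, findCrush_cons]
  have hsplit : ∀ (m : Nat), (List.replicate m a ++ v).takeWhile (· == a) = List.replicate m a ∧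
      (List.replicate m a ++ v).dropWhile (· == a) = v := by
    intro m
    cases hV : v with
    | nil =>
        constructor <;> simp [List.takeWhile_append, List.dropWhile_append]
    | cons d w =>
        have hd : d ≠ a := by
          apply hv; rw [hV]; simp
        exact tw_split (by intro y hy; simpa using List.eq_of_mem_replicate hy) hd
  rw [(hsplit k').1, (hsplit k').2]
  simp only [List.length_replicate]
  rw [if_pos (by omega)]

theorem findCrush_none_aux : ∀ (n : Nat) (u : List Char), u.length ≤ n → TF u → findCrush u = none := by
  intro n
  induction n with
  | zero =>
      intro u hl _
      rw [List.length_eq_zero_iff.mp (Nat.le_zero.mp hl)]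
      simp [findCrush]
  | succ n ih =>
      intro u hl hTF
      match u with
      | [] => simp [findCrush]
      | c :: u' =>
        rw [findCrush_cons]
        have hrun := TF_run_short hTF
        rw [if_neg (by omega)]
        have hnone : findCrush (u'.dropWhile (· == c)) = none := by
          apply ih _ (le_trans (List.length_dropWhile_le _ _) (by simpa using hl))
          exact TF_suffix ((List.dropWhile_suffix _).trans (List.suffix_cons c u')) hTF
        rw [hnone]

theorem TF_nil : TF ([] : List Char) := by intro a h; simpa using h.length_le

theorem findCrush_none {u : List Char} (hu : TF u) : findCrush u = none :=
  findCrush_none_aux u.length u le_rfl hu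

theorem findCrush_skip_aux : ∀ (n : Nat) (u : List Char) (a : Char) (k : Nat) (v : List Char),
    u.length ≤ n → TF u → 3 ≤ k → (∀ y ∈ u.getLast?, y ≠ a) → (∀ y ∈ v.head?, y ≠ a) →
    findCrush (u ++ List.replicate k a ++ v) = some (u ++ v) := by
  intro n
  induction n with
  | zero =>
      intro u a k v hl _ hk hla hva
      rw [List.length_eq_zero_iff.mp (Nat.le_zero.mp hl)]
      simpa using findCrush_run hk hva
  | succ n ih =>
      intro u a k v hl hTF hk hla hva
      match u with
      | [] => simpa using findCrush_run hk hva
      | c :: u' =>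
        have hu' : u'.takeWhile (· == c) ++ u'.dropWhile (· == c) = u' := List.takeWhile_append_dropWhile
        have hr : ∀ y ∈ u'.takeWhile (· == c), y = c := by
          intro y hy
          simpa using List.mem_takeWhile_imp hy
        have hrun := TF_run_short hTF
        have hstep : (c :: u') ++ List.replicate k a ++ v = c :: (u' ++ (List.replicate k a ++ v)) := by simp
        rw [hstep, findCrush_cons]
        cases hu2 : u'.dropWhile (· == c) with
        | nil =>
            -- u = c :: r, all equal to c; c ≠ a since getLast u = c
            have hueq : u' = u'.takeWhile (· == c) := by
              conv_lhs => rw [← hu', hu2, List.append_nil]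
            have hca : c ≠ a := by
              apply hla
              cases hgl : (c :: u').getLast? with
              | none => simp at hgl
              | some z =>
                  have hz : z ∈ c :: u' := List.mem_of_getLast? hgl
                  have hzc : z = c := by
                    rcases List.mem_cons.mp hz with h | h
                    · exact h
                    · exact hr z (hueq ▸ h)
                  simp [hzc]
            obtain ⟨k', rfl⟩ : ∃ k', k = k' + 1 := ⟨k - 1, by omega⟩
            have hrepc : List.replicate (k' + 1) a ++ v = a :: (List.replicate k' a ++ v) := by
              simp [List.replicate_succ]
            have hall : u' ++ List.replicate (k' + 1) a ++ v = (u'.takeWhile (· == c)) ++ a :: (List.replicate k' a ++ v) := by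
              conv_lhs => rw [← hu', hu2]
              simp [hrepc]
            have hsplit := tw_split (r := u'.takeWhile (· == c)) (w := List.replicate k' a ++ v) hr (Ne.symm hca)
            rw [List.append_assoc] at hall
            have h1 : (u' ++ (List.replicate (k' + 1) a ++ v)).takeWhile (· == c) = u'.takeWhile (· == c) := by
              rw [show u' ++ (List.replicate (k' + 1) a ++ v) = u'.takeWhile (· == c) ++ a :: (List.replicate k' a ++ v) from hall]
              exact hsplit.1
            have h2 : (u' ++ (List.replicate (k' + 1) a ++ v)).dropWhile (· == c) = a :: (List.replicate k' a ++ v) := by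
              rw [show u' ++ (List.replicate (k' + 1) a ++ v) = u'.takeWhile (· == c) ++ a :: (List.replicate k' a ++ v) from hall]
              exact hsplit.2
            rw [h1, h2, if_neg (by omega)]
            have : findCrush (a :: (List.replicate k' a ++ v)) = some v := by
              have := findCrush_run (a := a) (k := k' + 1) (v := v) (by omega) hva
              simpa [List.replicate_succ] using this
            rw [this, ← hueq]
            simp
        | cons d u3 =>
            have hd : d ≠ c := by
              have := List.head?_dropWhile_not (· == c) u'
              rw [hu2] at this
              simpa using this
            have hall : u' ++ (List.replicate k a ++ v) = u'.takeWhile (· == c) ++ d :: (u3 ++ (List.replicate k a ++ v)) := by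
              conv_lhs => rw [← hu', hu2]
              simp
            have hsplit := tw_split (r := u'.takeWhile (· == c)) (w := u3 ++ (List.replicate k a ++ v)) hr hd
            have h1 : (u' ++ (List.replicate k a ++ v)).takeWhile (· == c) = u'.takeWhile (· == c) := by
              rw [hall]; exact hsplit.1
            have h2 : (u' ++ (List.replicate k a ++ v)).dropWhile (· == c) = (d :: u3) ++ (List.replicate k a ++ v) := by
              rw [hall]; exact hsplit.2
            rw [h1, h2, if_neg (by omega)]
            have hsuf2 : (d :: u3) <:+ u' := hu2 ▸ List.dropWhile_suffix (p := (· == c))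
            have hsuf : (d :: u3) <:+ (c :: u') := hsuf2.trans (List.suffix_cons c u')
            have hlen2 : (d :: u3).length ≤ n := by
              have := hsuf2.length_le
              simp only [List.length_cons] at hl
              omega
            have hlast2 : ∀ y ∈ (d :: u3).getLast?, y ≠ a := by
              intro y hy
              apply hla
              obtain ⟨pre, hpre⟩ := hsuf
              rw [← hpre, List.getLast?_append, hy]
              simp
            have hrec := ih (d :: u3) a k v hlen2 (TF_suffix hsuf hTF) hk hlast2 hva
            rw [List.append_assoc] at hrec
            rw [hrec]
            congr 1
            conv_rhs => rw [show (c :: u') ++ v = c :: (u' ++ v) by simp, ← hu', hu2]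
            simp

theorem findCrush_skip {u : List Char} {a : Char} {k : Nat} {v : List Char}
    (hu : TF u) (hk : 3 ≤ k) (hl : ∀ y ∈ u.getLast?, y ≠ a) (hv : ∀ y ∈ v.head?, y ≠ a) :
    findCrush (u ++ List.replicate k a ++ v) = some (u ++ v) :=
  findCrush_skip_aux u.length u a k v le_rfl hu hk hl hv

theorem fixB_none {l : List Char} (h : findCrush l = none) : fixB l = l := by
  rw [fixB]
  split <;> simp_all

theorem fixB_some {l t : List Char} (h : findCrush l = some t) : fixB l = fixB t := by
  rw [fixB]
  split <;> simp_all

def decodeS (st : List (Char × Nat)) : List Char := (st.map Prod.fst).reverse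

def validS : List (Char × Nat) → Prop
  | [] => True
  | [(_, k)] => k = 1
  | (c, k) :: (c', k') :: t => (if c = c' then k = k' + 1 else k = 1) ∧ validS ((c', k') :: t)

def tailPart (st : List (Char × Nat)) : List (Char × Nat) :=
  match st with
  | [] => []
  | (c, _) :: _ => popRunA c st

def lowTail (st : List (Char × Nat)) : Prop := ∀ p ∈ tailPart st, p.2 ≤ 2

def runList (c : Char) : Nat → List (Char × Nat)
  | 0 => []
  | k + 1 => (c, k + 1) :: runList c k

theorem validS_tail {p : Char × Nat} {t : List (Char × Nat)} (h : validS (p :: t)) : validS t := by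
  match p, t with
  | _, [] => trivial
  | (c, k), (c', k') :: t => exact h.2

theorem validS_suffix {u st : List (Char × Nat)} (hs : u <:+ st) (h : validS st) : validS u := by
  obtain ⟨pre, rfl⟩ := hs
  induction pre with
  | nil => simpa using h
  | cons p pre ih => exact ih (validS_tail h)

theorem validS_pos {st : List (Char × Nat)} (h : validS st) : ∀ p ∈ st, 1 ≤ p.2 := by
  induction st with
  | nil => simp
  | cons p t ih =>
      intro q hq
      rcases List.mem_cons.mp hq with rfl | hq2
      · obtain ⟨c, k⟩ := q
        cases t with
        | nil => simp [show k = 1 from h]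
        | cons p' t' =>
            obtain ⟨c', k'⟩ := p'
            rcases h with ⟨h1, -⟩
            by_cases hc : c = c' <;> simp [hc] at h1 <;> omega
      · exact ih (validS_tail h) q hq2

theorem popRunA_suffix (t : Char) : ∀ st : List (Char × Nat), popRunA t st <:+ st := by
  intro st
  induction st with
  | nil => simp [popRunA]
  | cons p rest ih =>
      match p with
      | (c, k) =>
        rw [popRunA]
        by_cases hc : c = t
        · rw [if_pos hc]
          exact ih.trans (List.suffix_cons _ _)
        · rw [if_neg hc]

theorem runList_map_fst (c : Char) : ∀ k : Nat, (runList c k).map Prod.fst = List.replicate k c := by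
  intro k
  induction k with
  | zero => simp [runList]
  | succ k ih => simp [runList, List.replicate_succ, ih]

theorem runList_counts {c : Char} : ∀ {k : Nat}, ∀ p ∈ runList c k, p.2 ≤ k := by
  intro k
  induction k with
  | zero => simp [runList]
  | succ k ih =>
      intro p hp
      rcases List.mem_cons.mp hp with rfl | hp2
      · simp
      · exact Nat.le_succ_of_le (ih p hp2)

theorem stack_decomp {c : Char} : ∀ {t : List (Char × Nat)} {k : Nat}, validS ((c, k) :: t) →
    (c, k) :: t = runList c k ++ popRunA c ((c, k) :: t) ∧
    (∀ p ∈ (popRunA c ((c, k) :: t)).head?, p.1 ≠ c) := by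
  intro t
  induction t with
  | nil =>
      intro k h
      have hk : k = 1 := h
      subst hk
      simp [popRunA, runList]
  | cons p t ih =>
      intro k h
      obtain ⟨c', k'⟩ := p
      rcases h with ⟨h1, h2⟩
      by_cases hc : c = c'
      · subst hc
        rw [if_pos rfl] at h1
        subst h1
        have := ih (k := k') h2
        have hpop : popRunA c ((c, k' + 1) :: (c, k') :: t) = popRunA c ((c, k') :: t) := by
          simp [popRunA]
        constructor
        · rw [hpop, runList]
          conv_lhs => rw [show (c, k' + 1) :: (c, k') :: t = (c, k' + 1) :: ((c, k') :: t) from rfl]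
          rw [List.cons_append]
          congr 1
          exact this.1
        · rw [hpop]
          exact this.2
      · rw [if_neg hc] at h1
        subst h1
        have hpop : popRunA c ((c, 1) :: (c', k') :: t) = (c', k') :: t := by
          simp [popRunA, Ne.symm hc]
        rw [hpop]
        refine ⟨by simp [runList], ?_⟩
        intro p hp
        simp at hp
        rw [← hp]
        exact Ne.symm hc

theorem stack_TF : ∀ {st : List (Char × Nat)}, validS st → (∀ p ∈ st, p.2 ≤ 2) →
    TF (st.map Prod.fst) := by
  intro st
  induction st with
  | nil => intro _ _; exact TF_nil
  | cons p t ih =>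
      intro hv hle a hinf
      obtain ⟨c, k⟩ := p
      rcases List.infix_cons_iff.mp hinf with hpre | hinf2
      · rcases List.cons_prefix_cons.mp hpre with ⟨rfl, hpre2⟩
        match t, hv, hpre2 with
        | [], _, hpre2 => simp at hpre2
        | [(c2, k2)], hv, hpre2 =>
            have := hpre2.length_le
            simp at this
        | (c2, k2) :: (c3, k3) :: t2, hv, hpre2 =>
            simp only [List.map_cons] at hpre2
            rcases List.cons_prefix_cons.mp hpre2 with ⟨rfl, hpre3⟩
            rcases List.cons_prefix_cons.mp hpre3 with ⟨rfl, -⟩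
            rcases hv with ⟨h1, h2, h3⟩
            simp at h1 h2
            have hk3 : 1 ≤ k3 := validS_pos h3 (a, k3) (by simp)
            have hk : (a, k) ∈ (a, k) :: (a, k2) :: (a, k3) :: t2 := by simp
            have := hle (a, k) hk
            simp at this
            omega
      · exact ih (validS_tail hv) (fun q hq => hle q (List.mem_cons_of_mem _ hq)) a hinf2

theorem decode_decomp {c : Char} {k : Nat} {t : List (Char × Nat)} (h : validS ((c, k) :: t)) :
    decodeS ((c, k) :: t) = decodeS (popRunA c ((c, k) :: t)) ++ List.replicate k c := by
  have h1 := (stack_decomp h).1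
  unfold decodeS
  conv_lhs => rw [h1]
  simp [runList_map_fst]

theorem last_decode_ne {c : Char} {st : List (Char × Nat)}
    (h : ∀ p ∈ st.head?, p.1 ≠ c) : ∀ y ∈ (decodeS st).getLast?, y ≠ c := by
  intro y hy
  unfold decodeS at hy
  rw [List.getLast?_reverse, List.head?_map] at hy
  cases hh : st.head? with
  | none => rw [hh] at hy; simp at hy
  | some p =>
      rw [hh] at hy
      simp at hy
      rw [← hy]
      exact h p (by rw [hh]; rfl)

theorem TF_decode {st : List (Char × Nat)} (hv : validS st) (hle : ∀ p ∈ st, p.2 ≤ 2) :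
    TF (decodeS st) := TF_reverse (stack_TF hv hle)

theorem allLe {c : Char} {k : Nat} {t : List (Char × Nat)} (hv : validS ((c, k) :: t))
    (hlow : lowTail ((c, k) :: t)) (hk : k ≤ 2) : ∀ p ∈ (c, k) :: t, p.2 ≤ 2 := by
  intro p hp
  have h1 := (stack_decomp hv).1
  rw [h1] at hp
  rcases List.mem_append.mp hp with h | h
  · exact le_trans (runList_counts p h) hk
  · exact hlow p h

theorem valid_pop {c : Char} {k : Nat} {t : List (Char × Nat)} (hv : validS ((c, k) :: t)) :
    validS (popRunA c ((c, k) :: t)) := validS_suffix (popRunA_suffix c _) hv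

theorem mainG : ∀ (rest : List Char) (st : List (Char × Nat)), validS st → lowTail st →
    fixB (decodeS st ++ rest) = decodeS (finishA (rest.foldl stepA st)) := by
  intro rest
  induction rest with
  | nil =>
      intro st hv hlow
      simp only [List.foldl_nil, List.append_nil]
      match st with
      | [] => exact fixB_none (findCrush_none TF_nil)
      | (c, k) :: t =>
        by_cases hk3 : 3 ≤ k
        · rw [show finishA ((c, k) :: t) = popRunA c ((c, k) :: t) from by rw [finishA, if_pos hk3]]
          have hTF : TF (decodeS (popRunA c ((c, k) :: t))) :=
            TF_decode (valid_pop hv) hlow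
          have hfc : findCrush (decodeS ((c, k) :: t)) = some (decodeS (popRunA c ((c, k) :: t)) ++ []) := by
            rw [decode_decomp hv, ← List.append_nil (decodeS (popRunA c ((c, k) :: t)) ++ List.replicate k c)]
            exact findCrush_skip (v := []) hTF hk3 (last_decode_ne (stack_decomp hv).2) (by intro y hy; simp at hy)
          rw [fixB_some hfc, List.append_nil, fixB_none (findCrush_none hTF)]
        · rw [show finishA ((c, k) :: t) = (c, k) :: t from by rw [finishA, if_neg hk3]]
          exact fixB_none (findCrush_none (TF_decode hv (allLe hv hlow (by omega))))
  | cons x rest ih =>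
      intro st hv hlow
      rw [List.foldl_cons]
      have key : validS (stepA st x) ∧ lowTail (stepA st x) ∧
          fixB (decodeS st ++ x :: rest) = fixB (decodeS (stepA st x) ++ rest) := by
        match st with
        | [] =>
            refine ⟨rfl, ?_, ?_⟩
            · intro p hp
              simp [stepA, tailPart, popRunA] at hp
            · simp [stepA, decodeS]
        | (c, k) :: t =>
          by_cases hcx : c = x
          · have hstep : stepA ((c, k) :: t) x = (x, k + 1) :: (c, k) :: t := by
              simp [stepA, hcx]
            rw [hstep]
            refine ⟨⟨by simp [hcx], hv⟩, ?_, ?_⟩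
            · intro p hp
              apply hlow
              simp only [tailPart, popRunA, hcx, if_pos rfl] at hp ⊢
              exact hp
            · apply congrArg
              simp [decodeS]
          · by_cases hk3 : 3 ≤ k
            · have hlow' : ∀ p ∈ popRunA c ((c, k) :: t), p.2 ≤ 2 := by
                intro p hp
                apply hlow
                simpa [tailPart] using hp
              have hTFpop : TF (decodeS (popRunA c ((c, k) :: t))) :=
                TF_decode (valid_pop hv) hlow'
              have hhead : ∀ y ∈ (x :: rest).head?, y ≠ c := by
                intro y hy
                simp at hy
                subst hy
                exact Ne.symm hcx
              have hfix0 : fixB (decodeS ((c, k) :: t) ++ x :: rest) =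
                  fixB (decodeS (popRunA c ((c, k) :: t)) ++ x :: rest) := by
                rw [decode_decomp hv, List.append_assoc, ← List.append_assoc]
                exact fixB_some (findCrush_skip hTFpop hk3 (last_decode_ne (stack_decomp hv).2) hhead)
              cases hpop : popRunA c ((c, k) :: t) with
              | nil =>
                  have hstep : stepA ((c, k) :: t) x = [(x, 1)] := by
                    simp [stepA, hcx, hk3, hpop]
                  rw [hstep]
                  refine ⟨rfl, ?_, ?_⟩
                  · intro p hp
                    simp [tailPart, popRunA] at hp
                  · rw [hfix0, hpop]
                    apply congrArg
                    simp [decodeS]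
              | cons p' s' =>
                  obtain ⟨c', k'⟩ := p'
                  have hvpop : validS ((c', k') :: s') := hpop ▸ valid_pop hv
                  have hlepop : ∀ p ∈ (c', k') :: s', p.2 ≤ 2 := hpop ▸ hlow'
                  by_cases hc'x : c' = x
                  · have hstep : stepA ((c, k) :: t) x = (x, k' + 1) :: (c', k') :: s' := by
                      simp [stepA, hcx, hk3, hpop, hc'x]
                    rw [hstep]
                    refine ⟨⟨by simp [hc'x], hvpop⟩, ?_, ?_⟩
                    · intro p hp
                      simp only [tailPart, popRunA, hc'x, if_pos rfl] at hp
                      exact hlepop p (List.mem_cons_of_mem _ ((popRunA_suffix x s').sublist.subset hp))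
                    · rw [hfix0, hpop]
                      apply congrArg
                      simp [decodeS]
                  · have hstep : stepA ((c, k) :: t) x = (x, 1) :: (c', k') :: s' := by
                      simp [stepA, hcx, hk3, hpop, hc'x]
                    rw [hstep]
                    refine ⟨⟨by simp [Ne.symm hc'x], hvpop⟩, ?_, ?_⟩
                    · intro p hp
                      simp only [tailPart, popRunA, if_pos rfl, if_neg hc'x] at hp
                      exact hlepop p hp
                    · rw [hfix0, hpop]
                      apply congrArg
                      simp [decodeS]
            · have hstep : stepA ((c, k) :: t) x = (x, 1) :: (c, k) :: t := by
                simp [stepA, hcx, hk3]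
              rw [hstep]
              refine ⟨⟨by simp [Ne.symm hcx], hv⟩, ?_, ?_⟩
              · intro p hp
                simp only [tailPart, popRunA, if_pos rfl, if_neg hcx] at hp
                exact allLe hv hlow (by omega) p hp
              · apply congrArg
                simp [decodeS]
      rw [← ih (stepA st x) key.1 key.2.1]
      exact key.2.2

-- ===== VERDICT (by name: the statement is the Claim_ definition above) =====
theorem candyCrush1D_spec : Claim_equal_candyCrush1D := by
  intro S _
  unfold Spec_candyCrush1D candyCrush1D candyCrush1D_alt
  have h := mainG S.toList [] trivial (by intro p hp; simp [tailPart] at hp)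
  simp only [decodeS, List.map_nil, List.reverse_nil, List.nil_append] at h
  rw [← h]
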